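-- pv_equiv track=rewrite | github.com/AAG-95/Revisor-Energia-Coordinador_PBC | Funciones.py | generar_pares
-- ===== SOURCE A (Python) =====
-- def generar_pares(primer_año, último_año, primer_mes_primer_año, último_mes_último_año):
--     pares_lista = []
--
--     for año in range(primer_año, último_año + 1):
--         if año == primer_año:
--             mes_inicio = primer_mes_primer_año
--         else:
--             mes_inicio = 1
--
--         if año == último_año:
--             mes_fin = último_mes_último_año
--         else:
--             mes_fin = 12
--
--         for mes in range(mes_inicio, mes_fin + 1):
--             año_mes = int(str(año % 100) + "{:02d}".format(mes))
--             pares_lista.append((año, año_mes))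
--
--     return pares_lista
-- ===== SOURCE B (Python) =====
-- def generar_pares(primer_año, último_año, primer_mes_primer_año, último_mes_último_año):
--     # Single flat loop over a linear month counter (year*12 + month-1) instead of
--     # nested year/month loops with first/last-year boundary conditionals.
--     inicio = primer_año * 12 + (primer_mes_primer_año - 1)
--     fin = último_año * 12 + (último_mes_último_año - 1)
--     pares_lista = []
--     for i in range(inicio, fin + 1):
--         año, m = divmod(i, 12)
--         mes = m + 1
--         pares_lista.append((año, (año % 100) * 100 + mes))
--     return pares_lista
-- ===== Notes on version B (the rewrite author's own statement) =====
-- stated objective: alternative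
-- what changed: Replaced the nested year/month loops with per-iteration first/last-year boundary conditionals by one flat loop over a linear month counter year*12+(month-1), recovering (year, month) with divmod(i, 12) and computing the yearmonth code arithmetically as (year%100)*100+month instead of by string format+parse.
-- outside the precondition, e.g. on generar_pares(2001, 2001, 12, 13): A returns [(2001, 112), (2001, 113)], B returns [(2001, 112), (2002, 201)]; on generar_pares(2001, 2001, 0, 1): A returns [(2001, 100), (2001, 101)], B returns [(2000, 12), (2001, 101)]; on generar_pares(2001, 2001, -1, 1): A raises ValueError, B returns [(2000, 11), (2000, 12), (2001, 101)]
import Mathlib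
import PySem

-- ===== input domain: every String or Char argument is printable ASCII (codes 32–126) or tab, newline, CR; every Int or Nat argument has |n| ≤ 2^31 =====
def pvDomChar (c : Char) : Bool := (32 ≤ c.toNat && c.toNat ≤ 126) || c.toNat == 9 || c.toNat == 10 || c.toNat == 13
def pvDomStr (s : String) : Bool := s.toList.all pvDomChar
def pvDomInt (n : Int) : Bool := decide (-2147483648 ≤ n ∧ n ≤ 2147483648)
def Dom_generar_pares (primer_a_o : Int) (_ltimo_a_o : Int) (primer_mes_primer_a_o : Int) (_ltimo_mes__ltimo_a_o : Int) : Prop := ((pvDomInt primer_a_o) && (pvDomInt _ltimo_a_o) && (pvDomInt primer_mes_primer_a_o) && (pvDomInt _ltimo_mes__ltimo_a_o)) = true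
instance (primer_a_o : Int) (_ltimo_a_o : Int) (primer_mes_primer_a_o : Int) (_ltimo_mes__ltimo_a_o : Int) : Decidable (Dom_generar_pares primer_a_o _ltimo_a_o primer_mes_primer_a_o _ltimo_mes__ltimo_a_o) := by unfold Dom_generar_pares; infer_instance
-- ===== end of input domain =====

-- B replaces A's nested year/month loops with per-iteration boundary conditionals by one
-- flat loop over a linear month counter (year*12 + month-1) decoded with divmod, and an
-- arithmetic yearmonth code instead of A's string format+parse round-trip (same asymptotic cost).


-- ===== PORT A =====
-- "{:02d}".format(n): pad the decimal representation with '0' on the left to width 2.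
-- Exact for width 2: the sign of a negative number counts toward the width, and '-'
-- followed by one digit already has length 2.
def pyFmt02 (n : Int) : List Char :=
  let ds := PySem.Int.toChars n
  if ds.length < 2 then '0' :: ds else ds

-- int(str(año % 100) + "{:02d}".format(mes)); Python raises ValueError where ofChars?
-- is none (only when mes < 0) — those inputs are outside Pre_, so `.getD 0` is never hit.
def generar_pares (primer_a_o : Int) (_ltimo_a_o : Int) (primer_mes_primer_a_o : Int) (_ltimo_mes__ltimo_a_o : Int) : List (Int × Int) :=
  (PySem.List.pyRange primer_a_o (_ltimo_a_o + 1) 1).foldl (fun pares_lista a_o =>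
    let mes_inicio : Int := if a_o = primer_a_o then primer_mes_primer_a_o else 1
    let mes_fin : Int := if a_o = _ltimo_a_o then _ltimo_mes__ltimo_a_o else 12
    (PySem.List.pyRange mes_inicio (mes_fin + 1) 1).foldl (fun pares_lista mes =>
      let a_o_mes : Int := (PySem.Int.ofChars? (PySem.Int.toChars (PySem.Int.mod a_o 100) ++ pyFmt02 mes)).getD 0
      pares_lista ++ [(a_o, a_o_mes)]) pares_lista) []

-- ===== PORT B =====
def generar_pares_alt (primer_a_o : Int) (_ltimo_a_o : Int) (primer_mes_primer_a_o : Int) (_ltimo_mes__ltimo_a_o : Int) : List (Int × Int) :=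
  let inicio := primer_a_o * 12 + (primer_mes_primer_a_o - 1)
  let fin := _ltimo_a_o * 12 + (_ltimo_mes__ltimo_a_o - 1)
  (PySem.List.pyRange inicio (fin + 1) 1).foldl (fun pares_lista i =>
    let a_o := PySem.Int.floordiv i 12
    let m := PySem.Int.mod i 12
    let mes := m + 1
    pares_lista ++ [(a_o, PySem.Int.mod a_o 100 * 100 + mes)]) []

-- ===== PRECONDITION & SPEC =====
-- Pre_ admits calendar months 1..12, plus every year range that is empty for both programs
-- (there both loops are vacuous and both return []). Outside Pre_, A either raises ValueError
-- (a negative month makes int() fail) or returns raw out-of-range month codes that B's linear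
-- month counter instead rolls into the adjacent year.
def Pre_generar_pares (primer_a_o : Int) (_ltimo_a_o : Int) (primer_mes_primer_a_o : Int) (_ltimo_mes__ltimo_a_o : Int) : Prop :=
  (1 ≤ primer_mes_primer_a_o ∧ primer_mes_primer_a_o ≤ 12 ∧ 1 ≤ _ltimo_mes__ltimo_a_o ∧ _ltimo_mes__ltimo_a_o ≤ 12)
  ∨ (_ltimo_a_o < primer_a_o ∧ _ltimo_a_o * 12 + _ltimo_mes__ltimo_a_o < primer_a_o * 12 + primer_mes_primer_a_o)
instance (primer_a_o : Int) (_ltimo_a_o : Int) (primer_mes_primer_a_o : Int) (_ltimo_mes__ltimo_a_o : Int) : Decidable (Pre_generar_pares primer_a_o _ltimo_a_o primer_mes_primer_a_o _ltimo_mes__ltimo_a_o) := by unfold Pre_generar_pares; infer_instance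
def pvWitness_generar_pares : Int × Int × Int × Int := (2020, 2021, 11, 2)
def Spec_generar_pares (primer_a_o : Int) (_ltimo_a_o : Int) (primer_mes_primer_a_o : Int) (_ltimo_mes__ltimo_a_o : Int) (out : List (Int × Int)) : Prop := out = generar_pares_alt primer_a_o _ltimo_a_o primer_mes_primer_a_o _ltimo_mes__ltimo_a_o
instance (primer_a_o : Int) (_ltimo_a_o : Int) (primer_mes_primer_a_o : Int) (_ltimo_mes__ltimo_a_o : Int) (out : List (Int × Int)) : Decidable (Spec_generar_pares primer_a_o _ltimo_a_o primer_mes_primer_a_o _ltimo_mes__ltimo_a_o out) := by unfold Spec_generar_pares; infer_instance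

-- ===== CLAIM (what is proved, stated in full; the proofs are below) =====
def Claim_equal_generar_pares : Prop := ∀ (primer_a_o : Int) (_ltimo_a_o : Int) (primer_mes_primer_a_o : Int) (_ltimo_mes__ltimo_a_o : Int), Dom_generar_pares primer_a_o _ltimo_a_o primer_mes_primer_a_o _ltimo_mes__ltimo_a_o → Pre_generar_pares primer_a_o _ltimo_a_o primer_mes_primer_a_o _ltimo_mes__ltimo_a_o → Spec_generar_pares primer_a_o _ltimo_a_o primer_mes_primer_a_o _ltimo_mes__ltimo_a_o (generar_pares primer_a_o _ltimo_a_o primer_mes_primer_a_o _ltimo_mes__ltimo_a_o)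

-- ===== LEMMAS AND PROOFS =====

-- the month chunk of one year (what both programs emit for year y, months s..e)
def pvChunk (y s e : Int) : List (Int × Int) :=
  (PySem.List.pyRange s (e + 1) 1).map (fun mes => (y, PySem.Int.mod y 100 * 100 + mes))

-- one element of B's flat map
def pvFlatEl (i : Int) : Int × Int :=
  (PySem.Int.floordiv i 12,
   PySem.Int.mod (PySem.Int.floordiv i 12) 100 * 100 + (PySem.Int.mod i 12 + 1))

-- parsing the concatenation of a 1–2-digit year remainder and a 0-padded 2-digit month
set_option maxHeartbeats 4000000 in
set_option maxRecDepth 10000 in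
lemma pv_fmt_parse : ∀ (a : Fin 100) (m : Fin 13),
    PySem.Int.ofChars? (PySem.Int.toChars (a.val : Int) ++ pyFmt02 (m.val : Int))
      = some ((a.val : Int) * 100 + (m.val : Int)) := by decide

lemma pv_code_eq (y m : Int) (h0 : 0 ≤ m) (h1 : m ≤ 12) :
    (PySem.Int.ofChars? (PySem.Int.toChars (PySem.Int.mod y 100) ++ pyFmt02 m)).getD 0
      = PySem.Int.mod y 100 * 100 + m := by
  have ha0 : 0 ≤ PySem.Int.mod y 100 := PySem.Int.mod_nonneg y (by norm_num)
  have ha1 : PySem.Int.mod y 100 < 100 := PySem.Int.mod_lt y (by norm_num)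
  have h := pv_fmt_parse ⟨(PySem.Int.mod y 100).toNat, by omega⟩ ⟨m.toNat, by omega⟩
  simp only [Int.toNat_of_nonneg ha0, Int.toNat_of_nonneg h0] at h
  rw [h]; rfl

-- A's inner month loop appends exactly one chunk
lemma pv_inner (y s e : Int) (acc : List (Int × Int)) (h0 : 0 ≤ s) (h1 : e ≤ 12) :
    (PySem.List.pyRange s (e + 1) 1).foldl (fun pares_lista mes =>
        pares_lista ++ [(y, (PySem.Int.ofChars? (PySem.Int.toChars (PySem.Int.mod y 100) ++ pyFmt02 mes)).getD 0)]) acc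
      = acc ++ pvChunk y s e := by
  rw [PySem.List.foldl_append_singleton_eq_map]
  unfold pvChunk
  congr 1
  apply List.map_congr_left
  intro m hm
  have hb := PySem.List.mem_pyRange_one.mp hm
  rw [pv_code_eq y m (by omega) (by omega)]

-- one year's segment of B's flat range decodes to that year's chunk
lemma pv_seg (y s e : Int) (h1 : 1 ≤ s) (h2 : e ≤ 12) :
    (PySem.List.pyRange (y * 12 + (s - 1)) (y * 12 + (e - 1) + 1) 1).map pvFlatEl
      = pvChunk y s e := by
  unfold pvChunk
  rw [PySem.List.pyRange_one (y * 12 + (s - 1)), PySem.List.pyRange_one s,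
      List.map_map, List.map_map]
  have hlen : (y * 12 + (e - 1) + 1 - (y * 12 + (s - 1))).toNat = (e + 1 - s).toNat := by omega
  rw [hlen]
  apply List.map_congr_left
  intro k hk
  have hk' : (k : Int) < e + 1 - s := by
    have := List.mem_range.mp hk; omega
  have hknn : (0 : Int) ≤ (k : Int) := Int.natCast_nonneg k
  have hfd : PySem.Int.floordiv (y * 12 + (s - 1) + k) 12 = y := by
    rw [PySem.Int.floordiv_eq_iff_of_pos (by norm_num)]
    constructor <;> omega
  have hmod : PySem.Int.mod (y * 12 + (s - 1) + k) 12 = s - 1 + k := by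
    have := PySem.Int.floordiv_mul_add_mod (y * 12 + (s - 1) + k) 12
    rw [hfd] at this; omega
  simp only [Function.comp, pvFlatEl, hfd, hmod]
  congr 1
  omega

-- B's whole flat range is the concatenation of the yearly chunks
lemma pv_flat (n : Nat) : ∀ (p u pm um : Int), (u + 1 - p).toNat = n →
    1 ≤ pm → pm ≤ 12 → 1 ≤ um → um ≤ 12 →
    (PySem.List.pyRange (p * 12 + (pm - 1)) (u * 12 + (um - 1) + 1) 1).map pvFlatEl
      = (PySem.List.pyRange p (u + 1) 1).flatMap
          (fun y => pvChunk y (if y = p then pm else 1) (if y = u then um else 12)) := by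
  induction n with
  | zero =>
    intro p u pm um hn h1 h2 h3 h4
    rw [PySem.List.pyRange_one_eq_nil (by omega : u * 12 + (um - 1) + 1 ≤ p * 12 + (pm - 1)),
        PySem.List.pyRange_one_eq_nil (by omega : u + 1 ≤ p)]
    simp
  | succ n ih =>
    intro p u pm um hn h1 h2 h3 h4
    by_cases hpe : p = u
    · subst hpe
      rw [PySem.List.pyRange_one_singleton]
      simp only [List.flatMap_cons, List.flatMap_nil, List.append_nil]
      exact pv_seg p pm um h1 h4
    · have hlt : p < u := by omega
      rw [PySem.List.pyRange_one_append (p * 12 + (pm - 1)) ((p + 1) * 12) (u * 12 + (um - 1) + 1)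
            (by omega) (by omega),
          List.map_append]
      have hfirst : (PySem.List.pyRange (p * 12 + (pm - 1)) ((p + 1) * 12) 1).map pvFlatEl
          = pvChunk p pm 12 := by
        have he : (p + 1) * 12 = p * 12 + (12 - 1) + 1 := by ring
        rw [he]; exact pv_seg p pm 12 h1 le_rfl
      have hrest := ih (p + 1) u 1 um (by omega) le_rfl (by norm_num) h3 h4
      have he2 : (p + 1) * 12 + (1 - 1) = (p + 1) * 12 := by ring
      rw [he2] at hrest
      rw [hfirst, hrest, PySem.List.pyRange_one_cons (by omega : p < u + 1)]
      simp only [List.flatMap_cons, if_neg hpe]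
      congr 1
      apply List.flatMap_congr
      intro y hy
      have hb := PySem.List.mem_pyRange_one.mp hy
      rw [if_neg (by omega : ¬ y = p)]
      split <;> rfl

theorem generar_pares_spec : Claim_equal_generar_pares := by
  intro p u pm um _hdom hpre
  rcases hpre with ⟨h1, h2, h3, h4⟩ | ⟨hup, hflat⟩
  case inr =>
    unfold Spec_generar_pares generar_pares generar_pares_alt
    simp only []
    rw [PySem.List.pyRange_one_eq_nil (by omega : u + 1 ≤ p),
        PySem.List.pyRange_one_eq_nil (by omega : u * 12 + (um - 1) + 1 ≤ p * 12 + (pm - 1))]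
    rfl
  unfold Spec_generar_pares generar_pares generar_pares_alt
  have hA : (PySem.List.pyRange p (u + 1) 1).foldl (fun pares_lista a_o =>
      (PySem.List.pyRange (if a_o = p then pm else 1) ((if a_o = u then um else 12) + 1) 1).foldl
        (fun pares_lista mes =>
          pares_lista ++ [(a_o, (PySem.Int.ofChars? (PySem.Int.toChars (PySem.Int.mod a_o 100) ++ pyFmt02 mes)).getD 0)])
        pares_lista) ([] : List (Int × Int))
      = (PySem.List.pyRange p (u + 1) 1).foldl (fun pares_lista a_o =>
          pares_lista ++ pvChunk a_o (if a_o = p then pm else 1) (if a_o = u then um else 12)) [] := by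
    apply PySem.List.foldl_congr_mem
    intro acc a_o _ha
    exact pv_inner a_o _ _ acc (by split <;> omega) (by split <;> omega)
  simp only []
  rw [hA, PySem.List.foldl_append_eq_flatMap,
      PySem.List.foldl_append_singleton_eq_map, List.nil_append]
  exact (pv_flat (u + 1 - p).toNat p u pm um rfl h1 h2 h3 h4).symm
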